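-- pv_equiv track=rewrite | github.com/BonucciAndrea/DurreHeesch | Dreducing_graphs_final.py | ExtendCheck
-- ===== SOURCE A (Python) =====
-- import copy
--
-- def ExtendCheck(M,P):
--     checker = 1
--     while checker == 1:
--         checker = 0
--         for x in range(len(P)):
--             for y in M[x]:
--                 if len(P[y-1]) == 1 and P[y-1][0] in P[x]:
--                     checker = 1
--                     P[x].remove(P[y-1][0])
--     if list([]) in P:
--         return False
--     for x in range(len(P)):
--         P1 = list(P)
--         if len(P[x]) > 1:
--             for y in P[x]:
--                 P1[x] = [y]
--                 if ExtendCheck(M, copy.deepcopy(P1)):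
--                     return True
--             return False
--     return True
-- ===== SOURCE B (Python) =====
-- def ExtendCheck(M, P):
--     # Plain backtracking over variables left-to-right with incremental constraint
--     # checking; no propagation, no copying. Checks return value only (does not
--     # mutate P, unlike the original which prunes P in place).
--     n = len(P)
--     cons = [[] for _ in range(n)]  # constraint (x, e) stored at its larger endpoint
--     for x in range(n):
--         for y in M[x]:
--             e = (y - 1) % n
--             cons[max(x, e)].append((x, e))
--     def search(k, a):
--         if k == n:
--             return True
--         for v in P[k]:
--             a.append(v)
--             if all(a[x] != a[e] for (x, e) in cons[k]) and search(k + 1, a):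
--                 return True
--             a.pop()
--         return False
--     return search(0, [])
-- ===== Notes on version B (the rewrite author's own statement) =====
-- stated objective: alternative
-- what changed: A interleaves a whole-graph fixpoint constraint-propagation sweep (repeated full rescans that prune P in place) with branching on the first multi-valued variable and recursing on deepcopies; B drops propagation entirely and does plain left-to-right backtracking with a precomputed per-variable constraint table and incremental consistency checks, never copying or mutating P.
import Mathlib
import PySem

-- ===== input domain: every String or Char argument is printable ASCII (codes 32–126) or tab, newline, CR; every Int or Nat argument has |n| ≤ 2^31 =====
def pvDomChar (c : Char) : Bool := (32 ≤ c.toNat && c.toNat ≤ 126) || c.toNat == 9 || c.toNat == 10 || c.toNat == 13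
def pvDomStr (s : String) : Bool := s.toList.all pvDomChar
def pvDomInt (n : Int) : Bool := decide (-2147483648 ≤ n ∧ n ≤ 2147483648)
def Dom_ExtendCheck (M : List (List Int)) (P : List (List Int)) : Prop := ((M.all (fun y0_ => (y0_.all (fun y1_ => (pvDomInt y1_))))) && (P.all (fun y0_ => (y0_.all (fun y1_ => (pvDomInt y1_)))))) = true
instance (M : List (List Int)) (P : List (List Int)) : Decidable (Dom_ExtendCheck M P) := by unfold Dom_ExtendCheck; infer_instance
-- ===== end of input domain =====

-- B replaces A's repeated-full-rescan constraint propagation + branch-and-recurse (with deepcopies)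
-- by plain left-to-right backtracking with incremental consistency checks (objective: alternative;
-- return value only — A prunes the passed-in P in place, B does not mutate it).

-- ===== PORT A =====
-- one body of A's propagation double loop: 'if len(P[y-1]) == 1 and P[y-1][0] in P[x]: checker = 1; P[x].remove(P[y-1][0])'
def pvEC_step (x : Nat) (s : List (List Int) × Bool) (y : Int) : List (List Int) × Bool :=
  match PySem.List.pyGet? s.1 (y - 1) with
  | some row =>
      if row.length = 1 ∧ row.getD 0 0 ∈ s.1.getD x [] then
        (s.1.set x ((PySem.List.remove? (s.1.getD x []) (row.getD 0 0)).getD (s.1.getD x [])), true)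
      else s
  | none => s   -- Python raises IndexError here; excluded by Pre_ExtendCheck

-- one full pass 'for x in range(len(P)): for y in M[x]: …' starting with checker = 0
def pvEC_sweep (M P : List (List Int)) : List (List Int) × Bool :=
  (List.range P.length).foldl (fun s x => (M.getD x []).foldl (pvEC_step x) s) (P, false)

-- 'while checker == 1' loop; fuel bounds the number of passes (each re-entry removed an element)
def pvEC_prop (M : List (List Int)) : Nat → List (List Int) → List (List Int)
  | 0, P => P
  | fuel+1, P =>
      let s := pvEC_sweep M P
      if s.2 then pvEC_prop M fuel s.1 else s.1

def pvEC_size (P : List (List Int)) : Nat := (P.map List.length).sum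

-- A's body; fuel bounds the recursion depth (each recursive call strictly shrinks pvEC_size)
def pvEC_go (M : List (List Int)) : Nat → List (List Int) → Bool
  | 0, _ => false
  | fuel+1, P =>
      let P' := pvEC_prop M (pvEC_size P + 1) P
      if [] ∈ P' then false
      else
        match P'.findIdx? (fun d => 1 < d.length) with
        | some x => (P'.getD x []).any (fun v => pvEC_go M fuel (P'.set x [v]))
        | none => true

def ExtendCheck (M : List (List Int)) (P : List (List Int)) : Bool :=
  pvEC_go M (pvEC_size P + 1) P

-- ===== PORT B =====
-- '(y - 1) % n' of Source B (Python %, divisor sign)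
def pvEC_eIdx (n : Nat) (y : Int) : Nat := (PySem.Int.mod (y - 1) (n : Int)).toNat

-- 'cons[max(x, e)].append((x, e))' loop of Source B
def pvEC_cons (M : List (List Int)) (n : Nat) : List (List (Nat × Nat)) :=
  (List.range n).foldl
    (fun c x =>
      (M.getD x []).foldl
        (fun c y =>
          let e := pvEC_eIdx n y
          c.set (max x e) (c.getD (max x e) [] ++ [(x, e)])) c)
    (List.replicate n [])

-- 'search(k, a)' of Source B; fuel = n - k, so fuel 0 is 'k == n: return True'
def pvEC_search (P : List (List Int)) (cons : List (List (Nat × Nat))) : Nat → Nat → List Int → Bool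
  | 0, _, _ => true
  | fuel+1, k, a =>
      (P.getD k []).any fun v =>
        let a' := a ++ [v]
        ((cons.getD k []).all fun q => a'.getD q.1 0 != a'.getD q.2 0) &&
          pvEC_search P cons fuel (k+1) a'

def ExtendCheck_alt (M : List (List Int)) (P : List (List Int)) : Bool :=
  pvEC_search P (pvEC_cons M P.length) P.length 0 []

-- ===== PRECONDITION & SPEC =====
-- Pre_ excludes exactly the inputs on which A raises IndexError: some x < len(P) with
-- x ≥ len(M) (at 'M[x]'), or some y in M[x] with y-1 outside [-len(P), len(P)) (at 'P[y-1]').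
def Pre_ExtendCheck (M : List (List Int)) (P : List (List Int)) : Prop :=
  P.length ≤ M.length ∧
    ∀ x < P.length, ∀ y ∈ M.getD x [], -(P.length : Int) ≤ y - 1 ∧ y - 1 < (P.length : Int)
instance (M : List (List Int)) (P : List (List Int)) : Decidable (Pre_ExtendCheck M P) := by
  unfold Pre_ExtendCheck; infer_instance

def pvWitness_ExtendCheck : List (List Int) × List (List Int) := ([[2], [1]], [[1, 2], [1]])

def Spec_ExtendCheck (M : List (List Int)) (P : List (List Int)) (out : Bool) : Prop := out = ExtendCheck_alt M P
instance (M : List (List Int)) (P : List (List Int)) (out : Bool) : Decidable (Spec_ExtendCheck M P out) := by unfold Spec_ExtendCheck; infer_instance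

-- ===== CLAIM (what is proved, stated in full; the proofs are below) =====
def Claim_equal_ExtendCheck : Prop := ∀ (M : List (List Int)) (P : List (List Int)), Dom_ExtendCheck M P → Pre_ExtendCheck M P → Spec_ExtendCheck M P (ExtendCheck M P)

-- ===== LEMMAS AND PROOFS =====

-- Both programs are proved equal to 'some assignment a (one value per variable, drawn from its
-- domain P[x]) satisfies every constraint a[(y-1) mod n] ≠ a[x] (x < n, y ∈ M[x])'.

def pvSat (M : List (List Int)) (n : Nat) (a : List Int) : Prop :=
  ∀ x < n, ∀ y ∈ M.getD x [], a.getD (pvEC_eIdx n y) 0 ≠ a.getD x 0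

def pvFits (P : List (List Int)) (a : List Int) : Prop :=
  a.length = P.length ∧ ∀ x < P.length, a.getD x 0 ∈ P.getD x []

def pvEx (M P : List (List Int)) : Prop := ∃ a, pvFits P a ∧ pvSat M P.length a

theorem pvEC_pyGet?_emod {A : Type} (xs : List A) (i : Int) (h1 : -(xs.length:Int) ≤ i) (h2 : i < xs.length) :
    PySem.List.pyGet? xs i = xs[(i.emod xs.length).toNat]? := by
  simp only [PySem.List.pyGet?, PySem.List.pyIdx?]
  by_cases h : 0 ≤ i
  · rw [if_pos h, if_pos h2]
    have : i.emod (xs.length:Int) = i := Int.emod_eq_of_lt h h2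
    rw [this]; simp
  · rw [if_neg h, if_pos h1]
    have : i.emod (xs.length:Int) = i + xs.length := by
      have e1 : (i + (xs.length:Int) * 1) % (xs.length:Int) = i % xs.length :=
        Int.add_mul_emod_self_left i (xs.length:Int) 1
      have e2 : (i + (xs.length:Int)) % (xs.length:Int) = i + xs.length :=
        Int.emod_eq_of_lt (by omega) (by omega)
      show i % (xs.length:Int) = i + xs.length
      rw [mul_one] at e1
      rw [← e1]; exact e2
    rw [this]
    have : (i + (xs.length:Int)).toNat = xs.length - (-i).toNat := by omega
    rw [this]; simp


-- basic helpers --------------------------------------------------------------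

theorem pvEC_remove_getD_erase (l : List Int) (v : Int) :
    (PySem.List.remove? l v).getD l = l.erase v := by
  by_cases h : v ∈ l
  · rw [PySem.List.remove?_eq_some_erase l v h]; rfl
  · rw [(PySem.List.remove?_eq_none_iff l v).mpr h, List.erase_of_not_mem h]; rfl

theorem pvEC_getD_set_self {A : Type} (l : List (List A)) (i : Nat) (v : List A) (h : i < l.length) :
    (l.set i v).getD i [] = v := by
  simp [List.getD, h]

theorem pvEC_getD_set_ne {A : Type} (l : List (List A)) (i j : Nat) (v : List A) (h : i ≠ j) :
    (l.set i v).getD j [] = l.getD j [] := by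
  simp [List.getD, List.getElem?_set_ne h]

theorem pvEC_getD_eq_getElem {A : Type} (l : List (List A)) (i : Nat) (h : i < l.length) :
    l.getD i [] = l[i] := List.getD_eq_getElem l [] h

theorem pvEC_size_set (P : List (List Int)) (x : Nat) (v : List Int) (h : x < P.length) :
    pvEC_size (P.set x v) + (P.getD x []).length = pvEC_size P + v.length := by
  induction P generalizing x with
  | nil => simp at h
  | cons hd tl ih =>
      cases x with
      | zero => simp [pvEC_size, List.getD]; omega
      | succ m =>
          have hm : m < tl.length := by simpa using h
          have := ih m hm
          simp only [List.set, pvEC_size, List.map, List.sum_cons] at this ⊢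
          simp only [List.getD_cons_succ]
          omega

theorem pvEC_eIdx_eq_emod (n : Nat) (y : Int) (h : 0 < n) :
    pvEC_eIdx n y = ((y - 1).emod (n : Int)).toNat := by
  unfold pvEC_eIdx
  rw [PySem.Int.mod_eq_emod_of_pos (by exact_mod_cast h)]
  rfl

theorem pvEC_eIdx_lt (n : Nat) (y : Int) (h : 0 < n) : pvEC_eIdx n y < n := by
  rw [pvEC_eIdx_eq_emod n y h]
  have hn : (0:Int) < (n:Int) := by exact_mod_cast h
  have h1 : 0 ≤ (y - 1).emod (n:Int) := Int.emod_nonneg _ (by omega)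
  have h2 : (y - 1).emod (n:Int) < (n:Int) := Int.emod_lt_of_pos _ hn
  omega

-- under the Pre_ bounds, A's 'P[y-1]' is exactly the row at B's index '(y-1) % n'
theorem pvEC_pyGet?_eIdx (L : List (List Int)) (n : Nat) (y : Int) (hL : L.length = n)
    (h0 : 0 < n) (h1 : -(n:Int) ≤ y - 1) (h2 : y - 1 < (n:Int)) :
    PySem.List.pyGet? L (y - 1) = some (L.getD (pvEC_eIdx n y) []) := by
  subst hL
  rw [pvEC_pyGet?_emod L (y-1) h1 (by exact_mod_cast h2)]
  rw [← pvEC_eIdx_eq_emod L.length y h0]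
  have he : pvEC_eIdx L.length y < L.length := pvEC_eIdx_lt L.length y h0
  rw [List.getElem?_eq_getElem he, pvEC_getD_eq_getElem L _ he]

-- the propagation double loop, flattened to one pass over (x, y) pairs ------

def pvB (M : List (List Int)) (n : Nat) (q : Nat × Int) : Prop :=
  q.1 < n ∧ q.2 ∈ M.getD q.1 []

def pvPairs (M : List (List Int)) (n : Nat) : List (Nat × Int) :=
  (List.range n).flatMap fun x => (M.getD x []).map fun y => (x, y)

theorem pvEC_mem_pvPairs (M : List (List Int)) (n : Nat) (q : Nat × Int) :
    q ∈ pvPairs M n ↔ pvB M n q := by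
  cases q with
  | mk x y =>
    unfold pvPairs pvB
    rw [List.mem_flatMap]
    constructor
    · rintro ⟨x', hx', hq⟩
      rw [List.mem_map] at hq
      obtain ⟨y', hy', hqe⟩ := hq
      cases hqe
      exact ⟨by simpa using hx', hy'⟩
    · rintro ⟨hx, hy⟩
      refine ⟨x, by simpa using hx, ?_⟩
      rw [List.mem_map]
      exact ⟨y, hy, rfl⟩

def pvStepP (s : List (List Int) × Bool) (q : Nat × Int) : List (List Int) × Bool :=
  pvEC_step q.1 s q.2

theorem pvEC_sweep_flat (M P : List (List Int)) :
    pvEC_sweep M P = (pvPairs M P.length).foldl pvStepP (P, false) := by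
  unfold pvEC_sweep pvPairs
  rw [List.foldl_flatMap]
  congr 1
  funext s x
  rw [List.foldl_map]
  rfl

-- 'no pair (x, y) fires on state L'
def pvNoFireAt (L : List (List Int)) (q : Nat × Int) : Prop :=
  ∀ row, PySem.List.pyGet? L (q.2 - 1) = some row →
    ¬(row.length = 1 ∧ row.getD 0 0 ∈ L.getD q.1 [])

-- per-step facts ------------------------------------------------------------

theorem pvEC_step_length (x : Nat) (s : List (List Int) × Bool) (y : Int) :
    (pvEC_step x s y).1.length = s.1.length := by
  unfold pvEC_step
  cases PySem.List.pyGet? s.1 (y - 1) with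
  | none => rfl
  | some row => dsimp only; split_ifs <;> simp

theorem pvEC_step_size (x : Nat) (s : List (List Int) × Bool) (y : Int) (hx : x < s.1.length) :
    pvEC_size (pvEC_step x s y).1 ≤ pvEC_size s.1 ∧
      ((pvEC_step x s y).2 = true → s.2 = true ∨ pvEC_size (pvEC_step x s y).1 < pvEC_size s.1) := by
  unfold pvEC_step
  cases PySem.List.pyGet? s.1 (y - 1) with
  | none => exact ⟨le_refl _, fun h => Or.inl h⟩
  | some row =>
      dsimp only
      split_ifs with h
      · obtain ⟨h1, h2⟩ := h
        have hrm := pvEC_remove_getD_erase (s.1.getD x []) (row.getD 0 0)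
        have hel : ((s.1.getD x []).erase (row.getD 0 0)).length + 1 = (s.1.getD x []).length :=
          List.length_erase_add_one h2
        have hss := pvEC_size_set s.1 x ((s.1.getD x []).erase (row.getD 0 0)) hx
        constructor
        · dsimp only
          rw [hrm]
          omega
        · intro _
          right
          dsimp only
          rw [hrm]
          omega
      · exact ⟨le_refl _, fun h => Or.inl h⟩

theorem pvEC_step_nofire (x : Nat) (s : List (List Int) × Bool) (y : Int)
    (h : (pvEC_step x s y).2 = s.2) (hs : s.2 = false) :
    pvEC_step x s y = s ∧ pvNoFireAt s.1 (x, y) := by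
  unfold pvEC_step at *
  cases hg : PySem.List.pyGet? s.1 (y - 1) with
  | none => exact ⟨rfl, fun row hr => by rw [hg] at hr; cases hr⟩
  | some row =>
      rw [hg] at h
      dsimp only at h ⊢
      split_ifs at h with hc
      · rw [hs] at h; cases h
      · refine ⟨if_neg hc, ?_⟩
        intro row' hr'
        rw [hg] at hr'
        cases hr'
        exact hc

-- fits-preservation of one firing step, given the (x, y) constraint holds of a
theorem pvEC_step_fits (n : Nat) (x : Nat) (y : Int)
    (s : List (List Int) × Bool) (hL : s.1.length = n) (hx : x < n)
    (h1 : -(n:Int) ≤ y - 1) (h2 : y - 1 < (n:Int))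
    (a : List Int) (hc : a.getD (pvEC_eIdx n y) 0 ≠ a.getD x 0) :
    ((∀ j < n, a.getD j 0 ∈ (pvEC_step x s y).1.getD j []) ↔
      (∀ j < n, a.getD j 0 ∈ s.1.getD j [])) := by
  have h0 : 0 < n := by omega
  have hget := pvEC_pyGet?_eIdx s.1 n y hL h0 h1 h2
  set e := pvEC_eIdx n y with hedef
  have he : e < n := pvEC_eIdx_lt n y h0
  unfold pvEC_step
  rw [hget]
  dsimp only
  split_ifs with hcond
  · obtain ⟨hr1, hr2⟩ := hcond
    have hrm := pvEC_remove_getD_erase (s.1.getD x []) ((s.1.getD e []).getD 0 0)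
    simp only [hrm]
    -- the row is a singleton [w]
    obtain ⟨w, hw⟩ := List.length_eq_one_iff.mp hr1
    constructor
    · intro hall j hj
      by_cases hjx : j = x
      · subst hjx
        have := hall j hj
        rw [pvEC_getD_set_self s.1 j _ (by omega)] at this
        exact List.mem_of_mem_erase this
      · have := hall j hj
        rwa [pvEC_getD_set_ne s.1 x j _ (fun hh => hjx hh.symm)] at this
    · intro hall j hj
      by_cases hjx : j = x
      · subst hjx
        rw [pvEC_getD_set_self s.1 j _ (by omega)]
        -- a[e] is the unique element of row, so a[j] ≠ row head
        have hae2 : a.getD e 0 = w := by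
          have hm := hall e he
          rw [hw] at hm
          exact List.mem_singleton.mp hm
        have hane : a.getD j 0 ≠ (s.1.getD e []).getD 0 0 := by
          rw [hw]
          simp only [List.getD_cons_zero]
          intro hh
          exact hc (by rw [hae2, hh])
        exact (List.mem_erase_of_ne hane).mpr (hall j hj)
      · rw [pvEC_getD_set_ne s.1 x j _ (fun hh => hjx hh.symm)]
        exact hall j hj
  · exact Iff.rfl

-- facts about one flattened pass -------------------------------------------

theorem pvEC_step_mono (x : Nat) (s : List (List Int) × Bool) (y : Int) (h : s.2 = true) :
    (pvEC_step x s y).2 = true := by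
  unfold pvEC_step
  cases PySem.List.pyGet? s.1 (y - 1) with
  | none => exact h
  | some row => dsimp only; split_ifs <;> simp [h]

theorem pvEC_flat_mono (l : List (Nat × Int)) :
    ∀ s : List (List Int) × Bool, s.2 = true → (l.foldl pvStepP s).2 = true := by
  induction l with
  | nil => intro s h; exact h
  | cons q tl ih => intro s h; exact ih _ (pvEC_step_mono q.1 s q.2 h)

theorem pvEC_flat_facts (M : List (List Int)) (n : Nat)
    (hpre : ∀ q : Nat × Int, pvB M n q → -(n:Int) ≤ q.2 - 1 ∧ q.2 - 1 < (n:Int)) :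
    ∀ (l : List (Nat × Int)), (∀ q ∈ l, pvB M n q) →
      ∀ (s : List (List Int) × Bool), s.1.length = n →
        ((l.foldl pvStepP s).1.length = n ∧
          pvEC_size (l.foldl pvStepP s).1 ≤ pvEC_size s.1 ∧
          ((l.foldl pvStepP s).2 = true → s.2 = true ∨ pvEC_size (l.foldl pvStepP s).1 < pvEC_size s.1) ∧
          (∀ a : List Int, pvSat M n a →
            ((∀ j < n, a.getD j 0 ∈ (l.foldl pvStepP s).1.getD j []) ↔
              (∀ j < n, a.getD j 0 ∈ s.1.getD j []))) ∧
          (s.2 = false → (l.foldl pvStepP s).2 = false →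
            l.foldl pvStepP s = s ∧ ∀ q ∈ l, pvNoFireAt s.1 q)) := by
  intro l
  induction l with
  | nil =>
      intro _ s hs
      exact ⟨hs, le_refl _, fun h => Or.inl h, fun _ _ => Iff.rfl, fun _ _ => ⟨rfl, by simp⟩⟩
  | cons q tl ih =>
      intro hl s hs
      have hq : pvB M n q := hl q List.mem_cons_self
      have hb := hpre q hq
      have hx : q.1 < n := hq.1
      have hxs : q.1 < s.1.length := by omega
      have hstep_len := pvEC_step_length q.1 s q.2
      have hstep_size := pvEC_step_size q.1 s q.2 hxs
      have hs1len : (pvEC_step q.1 s q.2).1.length = n := by rw [hstep_len, hs]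
      have ihr := ih (fun p hp => hl p (List.mem_cons_of_mem q hp)) (pvEC_step q.1 s q.2) hs1len
      have hfold : (q :: tl).foldl pvStepP s = tl.foldl pvStepP (pvEC_step q.1 s q.2) := rfl
      rw [hfold]
      refine ⟨ihr.1, ihr.2.1.trans hstep_size.1, ?_, ?_, ?_⟩
      · intro h
        rcases ihr.2.2.1 h with h1 | h1
        · rcases hstep_size.2 h1 with h2 | h2
          · exact Or.inl h2
          · exact Or.inr (lt_of_le_of_lt ihr.2.1 h2)
        · exact Or.inr (lt_of_lt_of_le h1 hstep_size.1)
      · intro a hsat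
        have hc : a.getD (pvEC_eIdx n q.2) 0 ≠ a.getD q.1 0 := hsat q.1 hx q.2 hq.2
        have hstep_fits := pvEC_step_fits n q.1 q.2 s hs hx hb.1 hb.2 a hc
        exact (ihr.2.2.2.1 a hsat).trans hstep_fits
      · intro hsf hff
        have hs1f : (pvEC_step q.1 s q.2).2 = false := by
          by_contra hcon
          have : (pvEC_step q.1 s q.2).2 = true := by
            cases hh : (pvEC_step q.1 s q.2).2
            · exact absurd hh hcon
            · rfl
          exact absurd (pvEC_flat_mono tl _ this) (by rw [hff]; simp)
        have hnf := pvEC_step_nofire q.1 s q.2 (by rw [hs1f, hsf]) hsf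
        have ihnf := ihr.2.2.2.2 hs1f hff
        refine ⟨by rw [ihnf.1, hnf.1], ?_⟩
        intro p hp
        rcases List.mem_cons.mp hp with hpe | hpt
        · subst hpe; exact hnf.2
        · have := ihnf.2 p hpt
          rwa [hnf.1] at this

-- facts about one sweep and about the whole propagation loop ----------------

def pvNoFire (M : List (List Int)) (n : Nat) (L : List (List Int)) : Prop :=
  ∀ q : Nat × Int, pvB M n q → pvNoFireAt L q

theorem pvEC_pre_bounds (M P : List (List Int)) (h : Pre_ExtendCheck M P) :
    ∀ q : Nat × Int, pvB M P.length q → -(P.length:Int) ≤ q.2 - 1 ∧ q.2 - 1 < (P.length:Int) :=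
  fun q hq => h.2 q.1 hq.1 q.2 hq.2

theorem pvEC_sweep_facts (M P : List (List Int)) (h : Pre_ExtendCheck M P) :
    (pvEC_sweep M P).1.length = P.length ∧
      pvEC_size (pvEC_sweep M P).1 ≤ pvEC_size P ∧
      ((pvEC_sweep M P).2 = true → pvEC_size (pvEC_sweep M P).1 < pvEC_size P) ∧
      (∀ a : List Int, pvSat M P.length a →
        ((∀ j < P.length, a.getD j 0 ∈ (pvEC_sweep M P).1.getD j []) ↔
          (∀ j < P.length, a.getD j 0 ∈ P.getD j []))) ∧
      ((pvEC_sweep M P).2 = false → (pvEC_sweep M P).1 = P ∧ pvNoFire M P.length P) := by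
  have hf := pvEC_flat_facts M P.length (pvEC_pre_bounds M P h) (pvPairs M P.length)
    (fun q hq => (pvEC_mem_pvPairs M P.length q).mp hq) (P, false) rfl
  rw [← pvEC_sweep_flat M P] at hf
  refine ⟨hf.1, hf.2.1, ?_, hf.2.2.2.1, ?_⟩
  · intro hb
    rcases hf.2.2.1 hb with h1 | h1
    · cases h1
    · exact h1
  · intro hb
    have := hf.2.2.2.2 rfl hb
    exact ⟨congrArg Prod.fst this.1, fun q hq => this.2 q ((pvEC_mem_pvPairs M P.length q).mpr hq)⟩

theorem pvEC_pre_of_length (M P P' : List (List Int)) (hlen : P'.length = P.length)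
    (h : Pre_ExtendCheck M P) : Pre_ExtendCheck M P' := by
  unfold Pre_ExtendCheck at *
  rw [hlen]
  exact h

theorem pvEC_prop_facts (M : List (List Int)) :
    ∀ (fuel : Nat) (P : List (List Int)), Pre_ExtendCheck M P → pvEC_size P < fuel →
      ((pvEC_prop M fuel P).length = P.length ∧
        pvEC_size (pvEC_prop M fuel P) ≤ pvEC_size P ∧
        (∀ a : List Int, pvSat M P.length a →
          ((∀ j < P.length, a.getD j 0 ∈ (pvEC_prop M fuel P).getD j []) ↔
            (∀ j < P.length, a.getD j 0 ∈ P.getD j []))) ∧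
        pvNoFire M P.length (pvEC_prop M fuel P)) := by
  intro fuel
  induction fuel with
  | zero => intro P _ h; omega
  | succ fuel ih =>
      intro P hpre hsz
      show ((if (pvEC_sweep M P).2 then pvEC_prop M fuel (pvEC_sweep M P).1 else (pvEC_sweep M P).1).length = P.length ∧ _)
      have hsw := pvEC_sweep_facts M P hpre
      by_cases hb : (pvEC_sweep M P).2 = true
      · have hdec := hsw.2.2.1 hb
        have hpre' := pvEC_pre_of_length M P (pvEC_sweep M P).1 hsw.1 hpre
        have ihr := ih (pvEC_sweep M P).1 hpre' (by omega)
        rw [hsw.1] at ihr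
        simp only [pvEC_prop, hb, if_true]
        refine ⟨ihr.1, le_trans ihr.2.1 hsw.2.1, ?_, ihr.2.2.2⟩
        intro a hsat
        exact (ihr.2.2.1 a hsat).trans (hsw.2.2.2.1 a hsat)
      · have hb' : (pvEC_sweep M P).2 = false := by
          cases hh : (pvEC_sweep M P).2
          · rfl
          · exact absurd hh hb
        have hfix := hsw.2.2.2.2 hb'
        simp only [pvEC_prop, hb', if_false, Bool.false_eq_true]
        rw [hfix.1]
        exact ⟨rfl, le_refl _, fun _ _ => Iff.rfl, hfix.2⟩

-- correctness of A ----------------------------------------------------------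

theorem pvEC_ex_iff_of_prop (M P : List (List Int)) (R : List (List Int))
    (hlen : R.length = P.length)
    (hiff : ∀ a : List Int, pvSat M P.length a →
      ((∀ j < P.length, a.getD j 0 ∈ R.getD j []) ↔ (∀ j < P.length, a.getD j 0 ∈ P.getD j []))) :
    (pvEx M R ↔ pvEx M P) := by
  unfold pvEx pvFits
  rw [hlen]
  constructor
  · rintro ⟨a, ⟨ha1, ha2⟩, ha3⟩
    exact ⟨a, ⟨ha1, (hiff a ha3).mp ha2⟩, ha3⟩
  · rintro ⟨a, ⟨ha1, ha2⟩, ha3⟩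
    exact ⟨a, ⟨ha1, (hiff a ha3).mpr ha2⟩, ha3⟩

theorem pvEC_no_ex_of_empty (M P : List (List Int)) (h : [] ∈ P) : ¬ pvEx M P := by
  rintro ⟨a, ⟨_, ha2⟩, _⟩
  obtain ⟨i, hi, hie⟩ := List.mem_iff_getElem.mp h
  have := ha2 i hi
  rw [pvEC_getD_eq_getElem P i hi, hie] at this
  cases this

theorem pvEC_ex_branch (M P : List (List Int)) (x : Nat) (hx : x < P.length) :
    (pvEx M P ↔ ∃ v ∈ P.getD x [], pvEx M (P.set x [v])) := by
  constructor
  · rintro ⟨a, ⟨ha1, ha2⟩, ha3⟩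
    refine ⟨a.getD x 0, ha2 x hx, a, ⟨by simpa using ha1, ?_⟩, by simpa using ha3⟩
    intro j hj
    rw [List.length_set] at hj
    by_cases hjx : j = x
    · subst hjx
      rw [pvEC_getD_set_self P j _ hx]
      simp
    · rw [pvEC_getD_set_ne P x j _ (fun hh => hjx hh.symm)]
      exact ha2 j hj
  · rintro ⟨v, hv, a, ⟨ha1, ha2⟩, ha3⟩
    rw [List.length_set] at ha1
    refine ⟨a, ⟨ha1, ?_⟩, by simpa using ha3⟩
    intro j hj
    by_cases hjx : j = x
    · subst hjx
      have := ha2 j (by rw [List.length_set]; exact hj)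
      rw [pvEC_getD_set_self P j _ hx] at this
      rw [List.mem_singleton.mp this]
      exact hv
    · have := ha2 j (by rw [List.length_set]; exact hj)
      rwa [pvEC_getD_set_ne P x j _ (fun hh => hjx hh.symm)] at this

-- at an all-singleton fixpoint with no empty row, reading off the heads gives a solution
theorem pvEC_ex_of_fixpoint (M P : List (List Int)) (hpre : Pre_ExtendCheck M P)
    (hnf : pvNoFire M P.length P) (hne : [] ∉ P)
    (hsing : ∀ d ∈ P, ¬ (1 < d.length)) : pvEx M P := by
  have hlen1 : ∀ j, j < P.length → (P.getD j []).length = 1 := by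
    intro j hj
    rw [pvEC_getD_eq_getElem P j hj]
    have h1 : ¬ (1 < P[j].length) := hsing _ (List.getElem_mem hj)
    have h2 : P[j] ≠ [] := fun hh => hne (hh ▸ List.getElem_mem hj)
    have h3 : P[j].length ≠ 0 := fun hh => h2 (List.eq_nil_of_length_eq_zero hh)
    omega
  refine ⟨P.map (fun d => d.getD 0 0), ⟨by simp, ?_⟩, ?_⟩
  · intro j hj
    have hget : (P.map (fun d => d.getD 0 0)).getD j 0 = (P.getD j []).getD 0 0 := by
      rw [pvEC_getD_eq_getElem P j hj,
        List.getD_eq_getElem _ 0 (by simpa using hj), List.getElem_map]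
    rw [hget]
    obtain ⟨w, hw⟩ := List.length_eq_one_iff.mp (hlen1 j hj)
    rw [hw]
    simp
  · intro x hx y hy
    have h0 : 0 < P.length := by omega
    have hb := hpre.2 x hx y hy
    have hget := pvEC_pyGet?_eIdx P P.length y rfl h0 hb.1 hb.2
    set e := pvEC_eIdx P.length y with hedef
    have he : e < P.length := pvEC_eIdx_lt P.length y h0
    have hnfa := hnf (x, y) ⟨hx, hy⟩ _ hget
    have hre := hlen1 e he
    have hnm : (P.getD e []).getD 0 0 ∉ P.getD x [] := fun hmem => hnfa ⟨hre, hmem⟩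
    have hgete : (P.map (fun d => d.getD 0 0)).getD e 0 = (P.getD e []).getD 0 0 := by
      rw [pvEC_getD_eq_getElem P e he,
        List.getD_eq_getElem _ 0 (by simpa using he), List.getElem_map]
    have hgetx : (P.map (fun d => d.getD 0 0)).getD x 0 = (P.getD x []).getD 0 0 := by
      rw [pvEC_getD_eq_getElem P x hx,
        List.getD_eq_getElem _ 0 (by simpa using hx), List.getElem_map]
    rw [hgete, hgetx]
    obtain ⟨w, hw⟩ := List.length_eq_one_iff.mp (hlen1 x hx)
    intro hh
    apply hnm
    rw [hh, hw]
    simp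

theorem pvEC_go_correct (M : List (List Int)) :
    ∀ (fuel : Nat) (P : List (List Int)), Pre_ExtendCheck M P → pvEC_size P < fuel →
      (pvEC_go M fuel P = true ↔ pvEx M P) := by
  intro fuel
  induction fuel with
  | zero => intro P _ h; omega
  | succ fuel ih =>
      intro P hpre hsz
      have hprop := pvEC_prop_facts M (pvEC_size P + 1) P hpre (by omega)
      set P' := pvEC_prop M (pvEC_size P + 1) P with hP'
      have hpre' := pvEC_pre_of_length M P P' hprop.1 hpre
      have hex : pvEx M P' ↔ pvEx M P := pvEC_ex_iff_of_prop M P P' hprop.1 hprop.2.2.1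
      show ((if [] ∈ P' then false
        else match P'.findIdx? (fun d => 1 < d.length) with
          | some x => (P'.getD x []).any (fun v => pvEC_go M fuel (P'.set x [v]))
          | none => true) = true ↔ pvEx M P)
      by_cases hemp : [] ∈ P'
      · rw [if_pos hemp]
        simp only [Bool.false_eq_true, false_iff]
        intro hcon
        exact pvEC_no_ex_of_empty M P' hemp (hex.mpr hcon)
      · rw [if_neg hemp]
        cases hfi : P'.findIdx? (fun d => 1 < d.length) with
        | none =>
            have hsing : ∀ d ∈ P', ¬ (1 < d.length) := by
              intro d hd
              have := List.findIdx?_eq_none_iff.mp hfi d hd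
              simpa using this
            have hfix : pvNoFire M P'.length P' := by
              rw [hprop.1]; exact hprop.2.2.2
            have := pvEC_ex_of_fixpoint M P' hpre' hfix hemp hsing
            simp only [true_iff]
            exact hex.mp this
        | some x =>
            obtain ⟨hxlt, hpx, _⟩ := List.findIdx?_eq_some_iff_getElem.mp hfi
            have hxlen : 1 < (P'.getD x []).length := by
              rw [pvEC_getD_eq_getElem P' x hxlt]
              simpa using hpx
            rw [List.any_eq_true]
            have hbr := pvEC_ex_branch M P' x hxlt
            constructor
            · rintro ⟨v, hv, hgo⟩
              refine hex.mp (hbr.mpr ⟨v, hv, ?_⟩)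
              have hszv := pvEC_size_set P' x [v] hxlt
              have hsle : pvEC_size P' ≤ pvEC_size P := hprop.2.1
              refine (ih (P'.set x [v]) (pvEC_pre_of_length M P _ (by simp [hprop.1]) hpre) ?_).mp hgo
              simp only [List.length_cons, List.length_nil] at hszv
              omega
            · intro hpe
              obtain ⟨v, hv, hve⟩ := hbr.mp (hex.mpr hpe)
              refine ⟨v, hv, ?_⟩
              have hszv := pvEC_size_set P' x [v] hxlt
              have hsle : pvEC_size P' ≤ pvEC_size P := hprop.2.1
              refine (ih (P'.set x [v]) (pvEC_pre_of_length M P _ (by simp [hprop.1]) hpre) ?_).mpr hve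
              simp only [List.length_cons, List.length_nil] at hszv
              omega

theorem pvEC_A_correct (M P : List (List Int)) (hpre : Pre_ExtendCheck M P) :
    (ExtendCheck M P = true ↔ pvEx M P) :=
  pvEC_go_correct M (pvEC_size P + 1) P hpre (by omega)

-- correctness of B: the constraint table ------------------------------------

def pvConsStep (n : Nat) (c : List (List (Nat × Nat))) (q : Nat × Int) : List (List (Nat × Nat)) :=
  c.set (max q.1 (pvEC_eIdx n q.2))
    (c.getD (max q.1 (pvEC_eIdx n q.2)) [] ++ [(q.1, pvEC_eIdx n q.2)])

theorem pvEC_cons_flat (M : List (List Int)) (n : Nat) :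
    pvEC_cons M n = (pvPairs M n).foldl (pvConsStep n) (List.replicate n []) := by
  unfold pvEC_cons pvPairs
  rw [List.foldl_flatMap]
  congr 1
  funext c x
  rw [List.foldl_map]
  rfl

theorem pvEC_consFold_mem (n : Nat) :
    ∀ (l : List (Nat × Int)), (∀ q ∈ l, q.1 < n) →
      ∀ c : List (List (Nat × Nat)), c.length = n →
        ((l.foldl (pvConsStep n) c).length = n ∧
          ∀ (k : Nat) (q0 : Nat × Nat),
            (q0 ∈ (l.foldl (pvConsStep n) c).getD k [] ↔
              q0 ∈ c.getD k [] ∨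
                ∃ p ∈ l, q0 = (p.1, pvEC_eIdx n p.2) ∧ k = max p.1 (pvEC_eIdx n p.2))) := by
  intro l
  induction l with
  | nil => intro _ c hc; exact ⟨hc, fun k q0 => by simp⟩
  | cons p tl ih =>
      intro hl c hc
      have hp : p.1 < n := hl p List.mem_cons_self
      have h0 : 0 < n := by omega
      have he : pvEC_eIdx n p.2 < n := pvEC_eIdx_lt n p.2 h0
      have hm : max p.1 (pvEC_eIdx n p.2) < n := by omega
      have hc' : (pvConsStep n c p).length = n := by
        unfold pvConsStep; rw [List.length_set]; exact hc
      have ihr := ih (fun q hq => hl q (List.mem_cons_of_mem p hq)) (pvConsStep n c p) hc'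
      have hfold : ((p :: tl).foldl (pvConsStep n) c) = tl.foldl (pvConsStep n) (pvConsStep n c p) := rfl
      rw [hfold]
      refine ⟨ihr.1, ?_⟩
      intro k q0
      rw [ihr.2 k q0]
      have hstep : q0 ∈ (pvConsStep n c p).getD k [] ↔
          (q0 ∈ c.getD k [] ∨ (q0 = (p.1, pvEC_eIdx n p.2) ∧ k = max p.1 (pvEC_eIdx n p.2))) := by
        unfold pvConsStep
        by_cases hk : k = max p.1 (pvEC_eIdx n p.2)
        · subst hk
          rw [pvEC_getD_set_self c _ _ (by omega)]
          simp [List.mem_append]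
        · rw [pvEC_getD_set_ne c _ k _ (fun hh => hk hh.symm)]
          constructor
          · exact Or.inl
          · rintro (h | ⟨_, hke⟩)
            · exact h
            · exact absurd hke hk
      rw [hstep]
      constructor
      · rintro ((h | h) | ⟨q, hq, hqe⟩)
        · exact Or.inl h
        · exact Or.inr ⟨p, List.mem_cons_self, h⟩
        · exact Or.inr ⟨q, List.mem_cons_of_mem p hq, hqe⟩
      · rintro (h | ⟨q, hq, hqe⟩)
        · exact Or.inl (Or.inl h)
        · rcases List.mem_cons.mp hq with rfl | hqt
          · exact Or.inl (Or.inr hqe)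
          · exact Or.inr ⟨q, hqt, hqe⟩

theorem pvEC_cons_mem (M : List (List Int)) (n : Nat) (k : Nat) (q0 : Nat × Nat) :
    q0 ∈ (pvEC_cons M n).getD k [] ↔
      ∃ x < n, ∃ y ∈ M.getD x [], q0 = (x, pvEC_eIdx n y) ∧ k = max x (pvEC_eIdx n y) := by
  rw [pvEC_cons_flat]
  have hrep : (List.replicate n ([] : List (Nat × Nat))).length = n := List.length_replicate
  have hmem := (pvEC_consFold_mem n (pvPairs M n)
    (fun q hq => ((pvEC_mem_pvPairs M n q).mp hq).1) (List.replicate n []) hrep).2 k q0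
  rw [hmem]
  have hbase : (List.replicate n ([] : List (Nat × Nat))).getD k [] = [] := by
    by_cases hk : k < n
    · rw [pvEC_getD_eq_getElem _ k (by rw [hrep]; exact hk)]
      exact List.getElem_replicate _
    · rw [List.getD_eq_default]
      rw [hrep]; omega
  rw [hbase]
  simp only [List.not_mem_nil, false_or]
  constructor
  · rintro ⟨p, hp, hpe⟩
    have hb := (pvEC_mem_pvPairs M n p).mp hp
    exact ⟨p.1, hb.1, p.2, hb.2, hpe⟩
  · rintro ⟨x, hx, y, hy, hqe⟩
    exact ⟨(x, y), (pvEC_mem_pvPairs M n (x, y)).mpr ⟨hx, hy⟩, hqe⟩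

-- correctness of B: the backtracking search ---------------------------------

def pvConsistentUpTo (M : List (List Int)) (n k : Nat) (a : List Int) : Prop :=
  ∀ x < n, ∀ y ∈ M.getD x [],
    max x (pvEC_eIdx n y) < k → a.getD (pvEC_eIdx n y) 0 ≠ a.getD x 0

theorem pvEC_getD_take (c : List Int) (m j : Nat) (h : j < m) :
    (c.take m).getD j 0 = c.getD j 0 := by
  simp only [List.getD, List.getElem?_take, if_pos h]

theorem pvEC_search_correct (M P : List (List Int)) :
    ∀ (fuel k : Nat) (a : List Int), fuel + k = P.length → a.length = k →
      (∀ j < k, a.getD j 0 ∈ P.getD j []) →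
      pvConsistentUpTo M P.length k a →
      (pvEC_search P (pvEC_cons M P.length) fuel k a = true ↔
        ∃ c, pvFits P c ∧ pvSat M P.length c ∧ c.take k = a) := by
  intro fuel
  induction fuel with
  | zero =>
      intro k a hfk ha hfit hcons
      have hk : k = P.length := by omega
      subst hk
      simp only [pvEC_search, true_iff]
      refine ⟨a, ⟨ha, fun x hx => hfit x hx⟩, ?_, by rw [← ha]; exact List.take_length⟩
      intro x hx y hy
      have h0 : 0 < P.length := by omega
      have he := pvEC_eIdx_lt P.length y h0
      exact hcons x hx y hy (by omega)
  | succ fuel ih =>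
      intro k a hfk ha hfit hcons
      have hk : k < P.length := by omega
      show ((P.getD k []).any _ = true ↔ _)
      rw [List.any_eq_true]
      have hperv : ∀ v ∈ P.getD k [],
          ((((pvEC_cons M P.length).getD k []).all
              (fun q => (a ++ [v]).getD q.1 0 != (a ++ [v]).getD q.2 0) &&
            pvEC_search P (pvEC_cons M P.length) fuel (k+1) (a ++ [v])) = true ↔
            ∃ c, pvFits P c ∧ pvSat M P.length c ∧ c.take (k+1) = a ++ [v]) := by
        intro v hv
        set a' := a ++ [v] with ha'
        have ha'len : a'.length = k + 1 := by rw [ha']; simp [ha]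
        have hgetlt : ∀ j < k, a'.getD j 0 = a.getD j 0 := by
          intro j hj
          rw [ha']
          exact List.getD_append a [v] 0 j (by omega)
        have hgetk : a'.getD k 0 = v := by
          rw [ha']
          rw [List.getD_append_right a [v] 0 k (by omega)]
          rw [show k - a.length = 0 by omega]
          rfl
        have hcheck : (((pvEC_cons M P.length).getD k []).all
            (fun q => a'.getD q.1 0 != a'.getD q.2 0) = true) ↔
            pvConsistentUpTo M P.length (k+1) a' := by
          rw [List.all_eq_true]
          constructor
          · intro hall x hx y hy hmax
            by_cases hmk : max x (pvEC_eIdx P.length y) < k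
            · have := hcons x hx y hy hmk
              rw [hgetlt x (by omega), hgetlt (pvEC_eIdx P.length y) (by omega)]
              exact this
            · have hmeq : k = max x (pvEC_eIdx P.length y) := by omega
              have hq : (x, pvEC_eIdx P.length y) ∈ (pvEC_cons M P.length).getD k [] :=
                (pvEC_cons_mem M P.length k _).mpr ⟨x, hx, y, hy, rfl, hmeq⟩
              have := hall _ hq
              exact Ne.symm (bne_iff_ne.mp this)
          · intro hcons' q hq
            obtain ⟨x, hx, y, hy, hqe, hke⟩ := (pvEC_cons_mem M P.length k q).mp hq
            subst hqe
            rw [bne_iff_ne]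
            exact fun hh => hcons' x hx y hy (by omega) hh.symm
        by_cases hchk : ((pvEC_cons M P.length).getD k []).all
            (fun q => a'.getD q.1 0 != a'.getD q.2 0) = true
        · rw [hchk, Bool.true_and]
          have hfit' : ∀ j < k + 1, a'.getD j 0 ∈ P.getD j [] := by
            intro j hj
            by_cases hjk : j = k
            · subst hjk; rw [hgetk]; exact hv
            · rw [hgetlt j (by omega)]; exact hfit j (by omega)
          exact ih (k+1) a' (by omega) ha'len hfit' (hcheck.mp hchk)
        · have hchkf : (((pvEC_cons M P.length).getD k []).all
              (fun q => a'.getD q.1 0 != a'.getD q.2 0)) = false := by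
            cases hh : ((pvEC_cons M P.length).getD k []).all
                (fun q => a'.getD q.1 0 != a'.getD q.2 0)
            · rfl
            · exact absurd hh hchk
          rw [hchkf, Bool.false_and]
          simp only [Bool.false_eq_true, false_iff]
          rintro ⟨c, ⟨hc1, hc2⟩, hc3, hc4⟩
          -- the failed pair gives a violated constraint in any extension of a'
          obtain ⟨q, hq, hqv⟩ := List.all_eq_false.mp hchkf
          obtain ⟨x, hx, y, hy, hqe, hke⟩ := (pvEC_cons_mem M P.length k q).mp hq
          subst hqe
          have heq : a'.getD x 0 = a'.getD (pvEC_eIdx P.length y) 0 := by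
            by_contra hne
            exact hqv (bne_iff_ne.mpr hne)
          have hcget : ∀ j < k + 1, c.getD j 0 = a'.getD j 0 := by
            intro j hj
            rw [← hc4, pvEC_getD_take c (k+1) j hj]
          have hsatxy := hc3 x hx y hy
          have he := pvEC_eIdx_lt P.length y (by omega)
          rw [hcget x (by omega), hcget (pvEC_eIdx P.length y) (by omega)] at hsatxy
          exact hsatxy heq.symm
      constructor
      · rintro ⟨v, hv, hveq⟩
        obtain ⟨c, hcf, hcs, hct⟩ := (hperv v hv).mp hveq
        refine ⟨c, hcf, hcs, ?_⟩
        have : c.take k = (c.take (k+1)).take k := by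
          rw [List.take_take]
          congr 1
          omega
        rw [this, hct, ← ha, List.take_left]
      · rintro ⟨c, hcf, hcs, hct⟩
        have hclen : c.length = P.length := hcf.1
        set v := c.getD k 0 with hvdef
        have hv : v ∈ P.getD k [] := hcf.2 k hk
        refine ⟨v, hv, (hperv v hv).mpr ⟨c, hcf, hcs, ?_⟩⟩
        rw [List.take_add_one, hct]
        congr 1
        rw [List.getElem?_eq_getElem (by omega)]
        rw [hvdef, List.getD_eq_getElem c 0 (by omega)]
        rfl

theorem pvEC_B_correct (M P : List (List Int)) :
    (ExtendCheck_alt M P = true ↔ pvEx M P) := by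
  unfold ExtendCheck_alt
  rw [pvEC_search_correct M P P.length 0 [] (by omega) rfl (by omega)
    (fun x _ y _ h => by omega)]
  unfold pvEx
  constructor
  · rintro ⟨c, h1, h2, _⟩; exact ⟨c, h1, h2⟩
  · rintro ⟨c, h1, h2⟩; exact ⟨c, h1, h2, List.take_zero⟩

-- ===== VERDICT (by name: the statement is the Claim_ definition above) =====
theorem ExtendCheck_spec : Claim_equal_ExtendCheck := by
  intro M P _ hpre
  unfold Spec_ExtendCheck
  exact Bool.eq_iff_iff.mpr ((pvEC_A_correct M P hpre).trans (pvEC_B_correct M P).symm)
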